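-- pv_equiv track=rewrite | github.com/amahini95/Molocco | MolocoQ1.py | equalsWhenOneCharRemoved
-- ===== SOURCE A (Python) =====
-- def equalsWhenOneCharRemoved(x, y):
--     s1 = None
--     s2 = None
--     #if diff isn't 1, False by default
--     if len(x) is len(y) + 1:
--         s1 = x
--         s2 = y
--     elif len(y) is len(x) + 1:
--         s1 = y
--         s2 = x
--     else:
--         return False
--
--     a, b = 0, 0
--     diff = False
--     while a < len(s1) and b < len(s2):
--         if s1[a] != s2[b] and not diff:
--             diff = True
--             a += 1
--         elif s1[a] != s2[b]:
--             return False
--         else: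
--             a += 1
--             b += 1
--     return True
-- ===== SOURCE B (Python) =====
-- def equalsWhenOneCharRemoved(x, y):
--     # same length dispatch as A, including the `is` identity tests on lengths
--     if len(x) is len(y) + 1:
--         s1, s2 = x, y
--     elif len(y) is len(x) + 1:
--         s1, s2 = y, x
--     else:
--         return False
--     # find the length of the common prefix, then drop one char of s1 there
--     i = 0
--     while i < len(s2) and s1[i] == s2[i]:
--         i += 1
--     return s1[i+1:] == s2[i:]
-- ===== Notes on version B (the rewrite author's own statement) =====
-- stated objective: simpler
-- what changed: Keeps A's length dispatch (including the CPython interned-int `is` tests) but replaces the two-pointer loop with a diff flag by a single common-prefix scan followed by one slice comparison s1[i+1:] == s2[i:].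
import Mathlib
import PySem

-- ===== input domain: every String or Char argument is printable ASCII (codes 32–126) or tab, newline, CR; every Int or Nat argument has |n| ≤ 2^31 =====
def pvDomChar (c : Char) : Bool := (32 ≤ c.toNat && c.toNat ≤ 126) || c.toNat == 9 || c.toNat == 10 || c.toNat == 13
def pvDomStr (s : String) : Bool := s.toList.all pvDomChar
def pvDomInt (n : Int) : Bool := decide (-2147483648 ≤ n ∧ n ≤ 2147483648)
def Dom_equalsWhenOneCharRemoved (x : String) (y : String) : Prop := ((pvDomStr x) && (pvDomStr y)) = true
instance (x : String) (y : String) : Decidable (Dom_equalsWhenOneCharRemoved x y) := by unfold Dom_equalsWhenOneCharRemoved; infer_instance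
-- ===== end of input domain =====

-- B keeps A's length dispatch but replaces the two-pointer/diff-flag loop with a
-- common-prefix scan followed by one slice comparison (objective: simpler).
-- CPython note, modelled in BOTH ports: `len(x) is len(y) + 1` compares interned
-- int objects, so it is True exactly when the lengths match and the value is ≤ 256.

-- ===== PORT A =====
-- the two-pointer while loop of A: state is (s1[a:], s2[b:], diff)
def pvLoopA : List Char → List Char → Bool → Bool
  | c1 :: t1, c2 :: t2, diff =>
      if c1 ≠ c2 ∧ ¬ diff then pvLoopA t1 (c2 :: t2) true
      else if c1 ≠ c2 then false
      else pvLoopA t1 t2 diff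
  | _, _, _ => true
termination_by l1 _ _ => l1.length

def equalsWhenOneCharRemoved (x : String) (y : String) : Bool :=
  if x.toList.length = y.toList.length + 1 ∧ x.toList.length ≤ 256 then
    pvLoopA x.toList y.toList false
  else if y.toList.length = x.toList.length + 1 ∧ y.toList.length ≤ 256 then
    pvLoopA y.toList x.toList false
  else false

-- ===== PORT B =====
-- the common-prefix scan of B: i advances while i < len(s2) and s1[i] == s2[i]
def pvPref : List Char → List Char → Nat
  | c1 :: t1, c2 :: t2 => if c1 = c2 then pvPref t1 t2 + 1 else 0
  | _, _ => 0

def equalsWhenOneCharRemoved_alt (x : String) (y : String) : Bool :=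
  if x.toList.length = y.toList.length + 1 ∧ x.toList.length ≤ 256 then
    let i := pvPref x.toList y.toList
    decide (x.toList.drop (i + 1) = y.toList.drop i)
  else if y.toList.length = x.toList.length + 1 ∧ y.toList.length ≤ 256 then
    let i := pvPref y.toList x.toList
    decide (y.toList.drop (i + 1) = x.toList.drop i)
  else false

-- ===== PRECONDITION & SPEC =====
def Spec_equalsWhenOneCharRemoved (x : String) (y : String) (out : Bool) : Prop := out = equalsWhenOneCharRemoved_alt x y
instance (x : String) (y : String) (out : Bool) : Decidable (Spec_equalsWhenOneCharRemoved x y out) := by unfold Spec_equalsWhenOneCharRemoved; infer_instance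

-- ===== CLAIM (what is proved, stated in full; the proofs are below) =====
def Claim_equal_equalsWhenOneCharRemoved : Prop := ∀ (x : String) (y : String), Dom_equalsWhenOneCharRemoved x y → Spec_equalsWhenOneCharRemoved x y (equalsWhenOneCharRemoved x y)

-- ===== LEMMAS AND PROOFS =====

-- once the diff flag is set, A's loop compares the remainders elementwise
theorem pvLoopA_true_eq (l1 l2 : List Char) (h : l1.length = l2.length) :
    pvLoopA l1 l2 true = decide (l1 = l2) := by
  induction l1 generalizing l2 with
  | nil => cases l2 with
    | nil => simp [pvLoopA]
    | cons c t => simp at h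
  | cons c1 t1 ih =>
    cases l2 with
    | nil => simp at h
    | cons c2 t2 =>
      simp only [List.length_cons, Nat.add_right_cancel_iff] at h
      by_cases hc : c1 = c2
      · subst hc
        simp [pvLoopA, ih t2 h]
      · simp [pvLoopA, hc]

-- A's loop from a clear flag equals B's prefix-scan-then-slice comparison
theorem pvLoopA_false_eq (l1 l2 : List Char) (h : l1.length = l2.length + 1) :
    pvLoopA l1 l2 false
      = decide (l1.drop (pvPref l1 l2 + 1) = l2.drop (pvPref l1 l2)) := by
  induction l2 generalizing l1 with
  | nil =>
    cases l1 with
    | nil => simp at h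
    | cons c1 t1 =>
      simp only [List.length_cons, List.length_nil, Nat.add_right_cancel_iff] at h
      have ht1 : t1 = [] := List.eq_nil_of_length_eq_zero h
      subst ht1
      simp [pvLoopA, pvPref]
  | cons c2 t2 ih =>
    cases l1 with
    | nil => simp at h
    | cons c1 t1 =>
      simp only [List.length_cons, Nat.add_right_cancel_iff] at h
      by_cases hc : c1 = c2
      · subst hc
        simp [pvLoopA, pvPref, ih t1 h]
      · have : pvPref (c1 :: t1) (c2 :: t2) = 0 := by simp [pvPref, hc]
        rw [this]
        have hlen : t1.length = (c2 :: t2).length := by simp [h]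
        simp [pvLoopA, hc, pvLoopA_true_eq t1 (c2 :: t2) hlen]

-- ===== VERDICT (by name: the statement is the Claim_ definition above) =====
theorem equalsWhenOneCharRemoved_spec : Claim_equal_equalsWhenOneCharRemoved := by
  intro x y _
  unfold Spec_equalsWhenOneCharRemoved equalsWhenOneCharRemoved equalsWhenOneCharRemoved_alt
  split_ifs with h1 h2
  · exact pvLoopA_false_eq _ _ h1.1
  · exact pvLoopA_false_eq _ _ h2.1
  · rfl
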